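-- pv_equiv track=rewrite | github.com/Ashutosh0000000/Bharat-Prod. | app/streamlit_app.py | find_products_by_need
-- ===== SOURCE A (Python) =====
-- def find_products_by_need(need_text, products):
--     """Match user-provided need text to product names and descriptions."""
--     if not need_text:
--         return []
--
--     keywords = need_text.lower().split()
--     matches = []
--
--     for product in products:
--         content = f"{product.get('name', '')} {product.get('description', '')}".lower()
--         score = sum(1 for word in keywords if word in content)
--         if score > 0:
--             matches.append((product, score))
--
--     matches.sort(key=lambda x: x[1], reverse=True)
--     return [m[0] for m in matches]
-- ===== SOURCE B (Python) =====
-- def find_products_by_need(need_text, products):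
--     """Match user-provided need text to product names and descriptions."""
--     if not need_text:
--         return []
--
--     keywords = need_text.lower().split()
--     buckets = [[] for _ in range(len(keywords) + 1)]
--
--     for product in products:
--         content = "{} {}".format(product.get('name', ''), product.get('description', '')).lower()
--         score = 0
--         for word in keywords:
--             if word in content:
--                 score += 1
--         buckets[score].append(product)
--
--     result = []
--     for bucket in reversed(buckets[1:]):
--         result.extend(bucket)
--     return result
-- ===== Notes on version B (the rewrite author's own statement) =====
-- stated objective: alternative
-- what changed: Replaces collecting (product, score) tuples and a stable reverse comparison sort with a counting/bucket sort: products are appended in input order to a bucket per score, and the result is built by flattening the buckets from the highest score down to 1.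
import Mathlib
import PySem

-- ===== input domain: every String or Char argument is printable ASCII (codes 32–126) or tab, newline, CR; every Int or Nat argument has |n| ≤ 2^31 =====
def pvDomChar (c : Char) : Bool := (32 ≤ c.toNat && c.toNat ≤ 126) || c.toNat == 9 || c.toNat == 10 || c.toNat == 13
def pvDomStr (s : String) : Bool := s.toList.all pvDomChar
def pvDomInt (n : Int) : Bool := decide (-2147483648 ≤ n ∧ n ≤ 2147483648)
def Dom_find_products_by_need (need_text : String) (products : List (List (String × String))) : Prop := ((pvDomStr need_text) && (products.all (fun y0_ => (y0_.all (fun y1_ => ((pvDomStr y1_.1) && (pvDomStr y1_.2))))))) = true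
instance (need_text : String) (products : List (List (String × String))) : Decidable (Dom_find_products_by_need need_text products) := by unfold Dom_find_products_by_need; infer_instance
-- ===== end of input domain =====

-- B replaces A's stable reverse comparison sort of (product, score) pairs by a counting/bucket
-- sort (one bucket per score, flattened from the highest score down to 1); same return value.


-- ===== PORT A =====
-- content = f"{product.get('name','')} {product.get('description','')}".lower()
def pvContent (product : List (String × String)) : String :=
  PySem.Str.lower (PySem.Str.join " "
    [PySem.Dict.getD (PySem.Dict.mk product) "name" "",
     PySem.Dict.getD (PySem.Dict.mk product) "description" ""])

def find_products_by_need (need_text : String) (products : List (List (String × String))) : List (List (String × String)) :=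
  if need_text = "" then []
  else
    let keywords := PySem.Str.split₀ (PySem.Str.lower need_text)
    let matched := products.foldl (fun acc product =>
      let content := pvContent product
      -- score = sum(1 for word in keywords if word in content)
      let score : Nat := ((keywords.filter (fun word => PySem.Str.isIn word content)).map (fun _ => 1)).sum
      if score > 0 then acc ++ [(product, score)] else acc) []
    -- matches.sort(key=lambda x: x[1], reverse=True); return [m[0] for m in matches]
    (PySem.List.sorted matched (fun x => x.2) true).map (fun m => m.1)

-- ===== PORT B =====
def find_products_by_need_alt (need_text : String) (products : List (List (String × String))) : List (List (String × String)) :=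
  if need_text = "" then []
  else
    let keywords := PySem.Str.split₀ (PySem.Str.lower need_text)
    let buckets0 : List (List (List (String × String))) := List.replicate (keywords.length + 1) []
    let buckets := products.foldl (fun bs product =>
      let content := pvContent product
      let score : Nat := keywords.foldl (fun sc word => if PySem.Str.isIn word content then sc + 1 else sc) 0
      bs.modify score (fun b => b ++ [product])) buckets0
    -- for bucket in reversed(buckets[1:]): result.extend(bucket)
    ((PySem.List.slice buckets (some 1) none).reverse).foldl (fun r b => r ++ b) []

-- ===== PRECONDITION & SPEC =====
def Spec_find_products_by_need (need_text : String) (products : List (List (String × String))) (out : List (List (String × String))) : Prop := out = find_products_by_need_alt need_text products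
instance (need_text : String) (products : List (List (String × String))) (out : List (List (String × String))) : Decidable (Spec_find_products_by_need need_text products out) := by unfold Spec_find_products_by_need; infer_instance

-- ===== CLAIM (what is proved, stated in full; the proofs are below) =====
def Claim_equal_find_products_by_need : Prop := ∀ (need_text : String) (products : List (List (String × String))), Dom_find_products_by_need need_text products → Spec_find_products_by_need need_text products (find_products_by_need need_text products)

-- ===== LEMMAS AND PROOFS =====

-- the common per-product score, in its simplest form
def pvScore (keywords : List String) (product : List (String × String)) : Nat :=
  (keywords.filter (fun word => PySem.Str.isIn word (pvContent product))).length

-- descending concatenation G S ++ G (S-1) ++ … ++ G 1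
def pvDesc {α : Type} (G : Nat → List α) : Nat → List α
  | 0 => []
  | S + 1 => G (S + 1) ++ pvDesc G S

-- the score-s group of ms under key
def pvGrp {α : Type} (key : α → Nat) (ms : List α) (s : Nat) : List α :=
  ms.filter (fun y => key y = s)

lemma mem_pvDesc_grp {α : Type} (key : α → Nat) (ms : List α) (S : Nat) (y : α)
    (h : y ∈ pvDesc (pvGrp key ms) S) : y ∈ ms ∧ 1 ≤ key y ∧ key y ≤ S := by
  induction S with
  | zero => simp [pvDesc] at h
  | succ S ih =>
    simp only [pvDesc, pvGrp, List.mem_append, List.mem_filter] at h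
    rcases h with ⟨hm, hk⟩ | h
    · simp only [decide_eq_true_eq] at hk; exact ⟨hm, by omega, by omega⟩
    · rcases ih h with ⟨hm, h1, h2⟩; exact ⟨hm, h1, by omega⟩

lemma insertBy_skip {α : Type} (bef : α → α → Bool) (x : α) (g rest : List α)
    (h : ∀ y ∈ g, bef x y = false) :
    PySem.List.insertBy bef x (g ++ rest) = g ++ PySem.List.insertBy bef x rest := by
  induction g with
  | nil => simp
  | cons y g ih =>
    simp only [List.cons_append, PySem.List.insertBy, h y (by simp)]
    simpa using ih (fun z hz => h z (by simp [hz]))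

lemma insertBy_front {α : Type} (bef : α → α → Bool) (x : α) (l : List α)
    (h : ∀ y ∈ l, bef x y = true) :
    PySem.List.insertBy bef x l = x :: l := by
  cases l with
  | nil => rfl
  | cons y l => simp [PySem.List.insertBy, h y (by simp)]

lemma pvGrp_snoc {α : Type} (key : α → Nat) (ms : List α) (x : α) (s : Nat) :
    pvGrp key (ms ++ [x]) s = pvGrp key ms s ++ if key x = s then [x] else [] := by
  simp only [pvGrp, List.filter_append]
  by_cases h : key x = s <;> simp [List.filter, h]

lemma pvDesc_grp_snoc_of_gt {α : Type} (key : α → Nat) (ms : List α) (x : α) (S : Nat)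
    (h : S < key x) : pvDesc (pvGrp key (ms ++ [x])) S = pvDesc (pvGrp key ms) S := by
  induction S with
  | zero => rfl
  | succ S ih =>
    rw [pvDesc, pvDesc, ih (by omega), pvGrp_snoc]
    have : key x ≠ S + 1 := by omega
    simp [this]

lemma insertBy_pvDesc {α : Type} (key : α → Nat) (ms : List α) (x : α) (S : Nat)
    (h1 : 1 ≤ key x) (h2 : key x ≤ S) :
    PySem.List.insertBy (fun a b => decide (key b < key a)) x (pvDesc (pvGrp key ms) S)
      = pvDesc (pvGrp key (ms ++ [x])) S := by
  induction S with
  | zero => omega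
  | succ S ih =>
    by_cases hx : key x = S + 1
    · rw [pvDesc, insertBy_skip _ _ _ _ (by
        intro y hy
        simp only [pvGrp, List.mem_filter, decide_eq_true_eq] at hy
        simp only [decide_eq_false_iff_not]; omega),
        insertBy_front _ _ _ (by
          intro y hy
          rcases mem_pvDesc_grp key ms S y hy with ⟨_, _, hle⟩
          simp only [decide_eq_true_eq]; omega)]
      rw [pvDesc, pvDesc_grp_snoc_of_gt key ms x S (by omega), pvGrp_snoc]
      simp [hx]
    · rw [pvDesc, insertBy_skip _ _ _ _ (by
        intro y hy
        simp only [pvGrp, List.mem_filter, decide_eq_true_eq] at hy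
        simp only [decide_eq_false_iff_not]; omega),
        ih (by omega)]
      rw [pvDesc, pvGrp_snoc]
      have : key x ≠ S + 1 := hx
      simp [this]

-- stable reverse sort by a bounded positive key = descending concatenation of its groups
lemma sorted_rev_eq_pvDesc {α : Type} (key : α → Nat) (ms : List α) (S : Nat)
    (h : ∀ y ∈ ms, 1 ≤ key y ∧ key y ≤ S) :
    PySem.List.sorted ms key true = pvDesc (pvGrp key ms) S := by
  rw [PySem.List.sorted_rev_eq_foldl_insertBy]
  induction ms using List.reverseRecOn with
  | nil =>
    induction S with
    | zero => rfl
    | succ S ih => simp only [pvDesc, pvGrp, List.filter_nil, List.nil_append]; exact ih (by simp)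
  | append_singleton ms x ih =>
    rw [List.foldl_append, List.foldl_cons, List.foldl_nil,
      ih (fun y hy => h y (by simp [hy]))]
    exact insertBy_pvDesc key ms x S (h x (by simp)).1 (h x (by simp)).2

lemma foldl_count (p : String → Bool) (l : List String) (sc : Nat) :
    l.foldl (fun sc word => if p word then sc + 1 else sc) sc = sc + (l.filter p).length := by
  induction l generalizing sc with
  | nil => simp
  | cons w l ih => by_cases hw : p w <;> simp [List.filter, hw, ih] <;> omega

-- A's match-collection loop = filter + map
lemma matchesA_eq (kw : List String) (products : List (List (String × String)))
    (acc : List (List (String × String) × Nat)) :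
    products.foldl (fun acc product =>
        if pvScore kw product > 0 then acc ++ [(product, pvScore kw product)] else acc) acc
      = acc ++ (products.filter (fun p => pvScore kw p > 0)).map (fun p => (p, pvScore kw p)) := by
  induction products generalizing acc with
  | nil => simp
  | cons p products ih =>
    by_cases hp : pvScore kw p > 0 <;> simp [List.filter, hp, ih]

-- the bucket fold keeps bucket s = (prefix processed so far) restricted to score s
lemma buckets_inv (kw : List String) (products : List (List (String × String))) (K : Nat)
    (g : Nat → List (List (String × String)))
    (hb : ∀ p ∈ products, pvScore kw p ≤ K) :
    products.foldl (fun bs product =>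
        bs.modify (pvScore kw product) (fun b => b ++ [product])) ((List.range (K + 1)).map g)
      = (List.range (K + 1)).map (fun s => g s ++ pvGrp (pvScore kw) products s) := by
  induction products generalizing g with
  | nil => simp [pvGrp]
  | cons p products ih =>
    rw [List.foldl_cons]
    have hmod : (((List.range (K + 1)).map g).modify (pvScore kw p) (fun b => b ++ [p]))
        = (List.range (K + 1)).map (fun s => g s ++ if pvScore kw p = s then [p] else []) := by
      apply List.ext_getElem (by simp)
      intro j hj hj'
      simp only [List.getElem_modify, List.getElem_map, List.getElem_range]
      split
      · next heq => simp
      · next hne => simp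
    rw [hmod, ih _ (fun q hq => hb q (by simp [hq]))]
    apply List.map_congr_left
    intro s _
    by_cases hs : pvScore kw p = s <;> simp [pvGrp, List.filter, hs]

-- projecting the first components of the grouped matches gives the grouped products
lemma pvDesc_map_fst (kw : List String) (products : List (List (String × String))) (S : Nat) :
    (pvDesc (pvGrp (fun x => x.2)
        ((products.filter (fun p => pvScore kw p > 0)).map (fun p => (p, pvScore kw p)))) S).map
          (fun m => m.1)
      = pvDesc (fun s => pvGrp (pvScore kw) products s) S := by
  induction S with
  | zero => rfl
  | succ S ih =>
    simp only [pvDesc, List.map_append, ih]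
    congr 1
    simp only [pvGrp, List.filter_map, List.map_map, List.filter_filter]
    rw [List.filter_congr (q := fun p => decide (pvScore kw p = S + 1)) (by
      intro p _
      by_cases h : pvScore kw p = S + 1 <;> simp [Function.comp, h])]
    simp [Function.comp_def]

-- flattening the reversed tail of the range-indexed buckets = descending concatenation
lemma flatten_rev_buckets {α : Type} (G : Nat → List α) (K : Nat) (init : List α) :
    ((((List.range (K + 1)).map G).drop 1).reverse).foldl (fun r b => r ++ b) init
      = init ++ pvDesc G K := by
  induction K generalizing init with
  | zero => simp [pvDesc, List.range_succ]
  | succ K ih =>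
    have hsplit : (List.range (K + 1 + 1)).map G = (List.range (K + 1)).map G ++ [G (K + 1)] := by
      rw [List.range_succ, List.map_append]; rfl
    have hlen : 1 ≤ ((List.range (K + 1)).map G).length := by simp
    rw [hsplit, List.drop_append_of_le_length (by simpa using hlen), List.reverse_append,
      List.reverse_singleton, List.singleton_append, List.foldl_cons, ih]
    simp [pvDesc]

-- ===== VERDICT (by name: the statement is the Claim_ definition above) =====
theorem find_products_by_need_spec : Claim_equal_find_products_by_need := by
  unfold Claim_equal_find_products_by_need Spec_find_products_by_need
  intro need_text products _
  unfold find_products_by_need find_products_by_need_alt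
  by_cases hne : need_text = ""
  · simp [hne]
  · simp only [hne, if_false]
    set kw := PySem.Str.split₀ (PySem.Str.lower need_text) with hkw
    set K := kw.length with hK
    -- normalise both score computations to pvScore
    have hsum : ∀ product, (((kw.filter (fun word => PySem.Str.isIn word (pvContent product))).map
        (fun _ => (1 : Nat))).sum) = pvScore kw product := by
      intro product; simp [pvScore]
    have hcnt : ∀ product, kw.foldl (fun sc word =>
        if PySem.Str.isIn word (pvContent product) then sc + 1 else sc) 0 = pvScore kw product := by
      intro product; rw [foldl_count]; simp [pvScore]
    simp only [hsum, hcnt]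
    -- A side
    rw [matchesA_eq kw products []]
    have hbound : ∀ y ∈ (products.filter (fun p => pvScore kw p > 0)).map
        (fun p => (p, pvScore kw p)), 1 ≤ y.2 ∧ y.2 ≤ K := by
      intro y hy
      simp only [List.mem_map, List.mem_filter, decide_eq_true_eq] at hy
      rcases hy with ⟨p, ⟨_, hpos⟩, rfl⟩
      refine ⟨by omega, ?_⟩
      simpa [pvScore, hK] using List.length_filter_le _ kw
    rw [List.nil_append, sorted_rev_eq_pvDesc _ _ K hbound, pvDesc_map_fst]
    -- B side
    have hrep : (List.replicate (K + 1) ([] : List (List (String × String))))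
        = (List.range (K + 1)).map (fun _ => []) := by
      simp [List.map_const']
    rw [hrep, buckets_inv kw products K _ (by
      intro p _
      simpa [pvScore, hK] using List.length_filter_le _ kw)]
    rw [PySem.List.slice_from _ (by norm_num)]
    simp only [List.nil_append, Int.toNat_one]
    rw [flatten_rev_buckets]
    simp
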